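-- pv_equiv track=rewrite | github.com/corrosion521/Algorithm | bj1712.py | bep
-- ===== SOURCE A (Python) =====
-- def bep(a,b,c):
--     n = 0
--     i = 0
--     while c*i<=2100000000 :
--         if c*i>a+b*i :
--             return i
--         i+=1
--     return -1
-- ===== SOURCE B (Python) =====
-- def bep(a, b, c):
--     # smallest i >= 0 with c*i > a + b*i, i.e. (c-b)*i > a, subject to c*i <= 2100000000; else -1
--     if a < 0:
--         return 0
--     d = c - b
--     if d <= 0:
--         return -1
--     i = a // d + 1
--     if c > 0 and c * i > 2100000000:
--         return -1
--     return i
-- ===== Notes on version B (the rewrite author's own statement) =====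
-- stated objective: alternative
-- what changed: Replaced the linear scan over i by the closed form i = a//(c-b)+1 with a sign test on a and a single bound check.
import Mathlib
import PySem

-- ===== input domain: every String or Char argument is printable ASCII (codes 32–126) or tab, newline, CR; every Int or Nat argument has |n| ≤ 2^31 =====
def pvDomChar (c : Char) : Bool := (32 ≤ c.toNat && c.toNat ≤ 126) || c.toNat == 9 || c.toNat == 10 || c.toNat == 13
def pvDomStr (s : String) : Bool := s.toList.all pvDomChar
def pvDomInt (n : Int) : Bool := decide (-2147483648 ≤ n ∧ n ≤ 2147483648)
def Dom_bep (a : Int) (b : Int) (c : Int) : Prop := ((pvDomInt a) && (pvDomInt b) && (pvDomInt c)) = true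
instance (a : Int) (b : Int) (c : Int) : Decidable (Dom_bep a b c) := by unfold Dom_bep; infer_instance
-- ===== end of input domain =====

-- B replaces A's linear scan by the closed form i = a//(c-b)+1 with a sign test and one bound check (objective: alternative).

-- ===== PORT A =====
-- A's while loop as fuel recursion; the fuel (an upper bound on the iteration count
-- wherever the Python loop terminates, proved in bep_spec) is exhausted only on inputs
-- excluded by Pre_bep, where the Python loop diverges.
def bepLoop (a : Int) (b : Int) (c : Int) : Nat → Int → Int
  | 0, _ => -1
  | f+1, i =>
    if c*i ≤ 2100000000 then
      if c*i > a + b*i then i else bepLoop a b c f (i+1)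
    else -1

def bep (a : Int) (b : Int) (c : Int) : Int :=
  bepLoop a b c (2100000000 / c.toNat + a.natAbs + 2) 0

-- ===== PORT B =====
def bep_alt (a : Int) (b : Int) (c : Int) : Int :=
  if a < 0 then 0
  else
    let d := c - b
    if d ≤ 0 then -1
    else
      let i := PySem.Int.floordiv a d + 1
      if 0 < c ∧ 2100000000 < c * i then -1 else i

-- ===== PRECONDITION & SPEC =====
-- Pre_bep excludes exactly the inputs (a ≥ 0, c ≤ b and c ≤ 0) on which A's while
-- loop never terminates (the Python A returns no value there).
def Pre_bep (a : Int) (b : Int) (c : Int) : Prop := a < 0 ∨ 0 < c ∨ b < c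
instance (a : Int) (b : Int) (c : Int) : Decidable (Pre_bep a b c) := by unfold Pre_bep; infer_instance
def pvWitness_bep : Int × Int × Int := (10, 2, 5)

def Spec_bep (a : Int) (b : Int) (c : Int) (out : Int) : Prop := out = bep_alt a b c
instance (a : Int) (b : Int) (c : Int) (out : Int) : Decidable (Spec_bep a b c out) := by unfold Spec_bep; infer_instance

-- ===== CLAIM (what is proved, stated in full; the proofs are below) =====
def Claim_equal_bep : Prop := ∀ (a : Int) (b : Int) (c : Int), Dom_bep a b c → Pre_bep a b c → Spec_bep a b c (bep a b c)

-- ===== LEMMAS AND PROOFS =====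

-- The loop from counter i, with enough fuel, returns the first j ≥ i at which the
-- loop guard fails or the inner condition fires: j itself if the guard still holds
-- there, -1 otherwise.
lemma bepLoop_firstStop (a b c j : Int) :
    ∀ (f : Nat) (i : Int), i ≤ j →
      (¬ c*j ≤ 2100000000 ∨ c*j > a + b*j) →
      (∀ k, i ≤ k → k < j → c*k ≤ 2100000000 ∧ ¬ c*k > a + b*k) →
      (j - i).toNat < f →
      bepLoop a b c f i = if c*j ≤ 2100000000 ∧ c*j > a + b*j then j else -1 := by
  intro f
  induction f with
  | zero => intro i _ _ _ hf; omega
  | succ f ih =>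
    intro i hij hstop hmin hf
    rcases eq_or_lt_of_le hij with rfl | hlt
    · simp only [bepLoop]
      by_cases hB : c*i ≤ 2100000000
      · rcases hstop with h | h
        · exact absurd hB h
        · simp [hB, h]
      · simp [hB]
    · have hk := hmin i le_rfl hlt
      simp only [bepLoop, if_pos hk.1, if_neg hk.2]
      exact ih (i+1) (by omega) hstop (fun k h1 h2 => hmin k (by omega) h2) (by omega)

lemma bep_spec_aux (a b c : Int) (hd : -2147483648 ≤ a ∧ a ≤ 2147483648)
    (hpre : Pre_bep a b c) : bep a b c = bep_alt a b c := by
  unfold bep bep_alt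
  by_cases ha : a < 0
  · -- loop fires immediately at i = 0
    rw [bepLoop_firstStop a b c 0 _ 0 le_rfl (Or.inr (by omega)) (by omega) (by positivity)]
    simp [ha]
  · rw [not_lt] at ha
    by_cases hdpos : c - b ≤ 0
    · -- condition (c-b)*i > a never fires (i ≥ 0, a ≥ 0); Pre_ forces 0 < c, loop
      -- runs to the guard bound and returns -1
      have hc : 0 < c := by rcases hpre with h | h | h <;> omega
      set m : Int := 2100000000 / c with hm
      have hm0 : 0 ≤ m := Int.ediv_nonneg (by norm_num) (le_of_lt hc)
      have hmle : c * m ≤ 2100000000 := by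
        have := Int.emod_nonneg 2100000000 (ne_of_gt hc)
        have := Int.mul_ediv_add_emod 2100000000 c
        nlinarith
      have hmgt : 2100000000 < c * (m + 1) := by
        have := Int.lt_ediv_add_one_mul_self 2100000000 hc
        linarith [this]
      have hP : ∀ k : Int, 0 ≤ k → ¬ c*k > a + b*k := by
        intro k hk
        have : (c - b) * k ≤ 0 := mul_nonpos_of_nonpos_of_nonneg hdpos hk
        nlinarith
      have hfuel : (m + 1 - 0).toNat < 2100000000 / c.toNat + a.natAbs + 2 := by
        have hcn : (c.toNat : Int) = c := Int.toNat_of_nonneg (le_of_lt hc)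
        have : m = ((2100000000 / c.toNat : Nat) : Int) := by
          rw [hm, ← hcn]; push_cast; simp
        omega
      rw [bepLoop_firstStop a b c (m+1) _ 0 (by omega)
        (Or.inl (by omega))
        (fun k h1 h2 => ⟨by nlinarith, hP k h1⟩)
        hfuel]
      simp [not_le.mpr hmgt, not_lt.mpr ha, hdpos]
    · -- c - b > 0: first counter with (c-b)*i > a is i0 = a/(c-b)+1
      rw [not_le] at hdpos
      set d : Int := c - b with hdef
      set i0 : Int := a / d + 1 with hi0
      have hi0pos : 0 < i0 := by
        have : 0 ≤ a / d := Int.ediv_nonneg ha (le_of_lt hdpos)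
        omega
      have hgt : d * i0 > a := by
        have := Int.lt_ediv_add_one_mul_self a hdpos
        linarith
      have hPi0 : c*i0 > a + b*i0 := by nlinarith
      have hnot : ∀ k, 0 ≤ k → k < i0 → ¬ c*k > a + b*k := by
        intro k h1 h2 h
        have hdk : a < k * d := by nlinarith
        have : a / d < k := (Int.ediv_lt_iff_lt_mul hdpos).mpr hdk
        omega
      have hfd : PySem.Int.floordiv a d = a / d := PySem.Int.floordiv_eq_ediv_of_pos hdpos
      by_cases hc : 0 < c
      · set m : Int := 2100000000 / c with hm
        have hmle : c * m ≤ 2100000000 := by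
          have := Int.emod_nonneg 2100000000 (ne_of_gt hc)
          have := Int.mul_ediv_add_emod 2100000000 c
          nlinarith
        have hmgt : 2100000000 < c * (m + 1) := by
          have := Int.lt_ediv_add_one_mul_self 2100000000 hc
          linarith
        have hm0 : 0 ≤ m := Int.ediv_nonneg (by norm_num) (le_of_lt hc)
        have hcn : (c.toNat : Int) = c := Int.toNat_of_nonneg (le_of_lt hc)
        have hmN : m = ((2100000000 / c.toNat : Nat) : Int) := by
          rw [hm, ← hcn]; push_cast; simp
        have hBmono : ∀ k : Int, 0 ≤ k → k ≤ m → c * k ≤ 2100000000 := by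
          intro k h1 h2; nlinarith
        by_cases hbound : i0 ≤ m
        · -- closed-form counter is inside the guard bound: loop returns i0
          rw [bepLoop_firstStop a b c i0 _ 0 (by omega)
            (Or.inr hPi0)
            (fun k h1 h2 => ⟨hBmono k h1 (by omega), hnot k h1 h2⟩)
            (by omega)]
          have hB : c * i0 ≤ 2100000000 := hBmono i0 (by omega) hbound
          simp [hB, hPi0, not_lt.mpr ha, not_le.mpr hdpos, hfd, ← hi0, hc, not_lt.mpr hB]
        · -- guard bound is crossed first: loop returns -1, and c*i0 > 2100000000
          rw [not_le] at hbound
          have hstopB : ¬ c*(m+1) ≤ 2100000000 := by omega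
          rw [bepLoop_firstStop a b c (m+1) _ 0 (by omega)
            (Or.inl hstopB)
            (fun k h1 h2 => ⟨hBmono k h1 (by omega), hnot k h1 (by omega)⟩)
            (by omega)]
          have hBi0 : 2100000000 < c * i0 := by nlinarith
          simp [hstopB, not_lt.mpr ha, not_le.mpr hdpos, hfd, ← hi0, hc, hBi0]
      · -- c ≤ 0: the guard never fails before i0 (c*k ≤ 0), loop returns i0
        rw [not_lt] at hc
        rw [bepLoop_firstStop a b c i0 _ 0 (by omega)
          (Or.inr hPi0)
          (fun k h1 h2 => ⟨by nlinarith, hnot k h1 h2⟩)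
          (by
            have hi0a : i0 ≤ a + 1 := by
              have : a / d ≤ a := Int.ediv_le_self d ha
              omega
            refine lt_of_lt_of_le (b := a.natAbs + 2) (by omega) ?_
            exact Nat.add_le_add_right (Nat.le_add_left _ _) 2)]
        have hB : c * i0 ≤ 2100000000 := by nlinarith
        simp [hB, hPi0, not_lt.mpr ha, not_le.mpr hdpos, hfd, ← hi0, not_lt.mpr hc]

-- ===== VERDICT (by name: the statement is the Claim_ definition above) =====
theorem bep_spec : Claim_equal_bep := by
  intro a b c hdom hpre
  unfold Spec_bep
  have hd : -2147483648 ≤ a ∧ a ≤ 2147483648 := by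
    unfold Dom_bep pvDomInt at hdom
    simp only [Bool.and_eq_true, decide_eq_true_eq] at hdom
    exact hdom.1.1
  exact bep_spec_aux a b c hd hpre
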